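-- pv_equiv track=rewrite | github.com/ShaiFeld18/labs | excercises/ex5/wordsearch.py | downleft_diagonal_strings
-- ===== SOURCE A (Python) =====
-- MATRIX_MODEL = list[list[str]]
--
-- def downleft_diagonal_strings(matrix: MATRIX_MODEL) -> list[str]:
--     """
--     Creates downleft diagonal strings from a matrix.
--     :param matrix: Matrx
--     :return: list of strings representing diagonals downleftwards.
--     """
--     rows, cols = len(matrix), len(matrix[0])
--     diagonals = []
--     starting_row, starting_col = rows - 1, cols - 1
--     while starting_col >= 0:
--         diagonals.append('')
--         row, col = starting_row, starting_col
--         while row < rows and col >= 0: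
--             diagonals[len(diagonals) - 1] += matrix[row][col]
--             row += 1
--             col -= 1
--         starting_row = starting_row - 1 if len(diagonals) < rows else 0
--         starting_col = cols - 1 if len(diagonals) < rows else starting_col - 1
--     return diagonals
-- ===== SOURCE B (Python) =====
-- def downleft_diagonal_strings(matrix):
--     """One row-major pass scattering each cell into a bucket keyed by its
--     anti-diagonal sum r+c, then reversing the bucket list; no diagonal walk."""
--     rows, cols = len(matrix), len(matrix[0])
--     if cols == 0:
--         return []
--     buckets = [''] * (rows + cols - 1)
--     for r, row in enumerate(matrix):
--         for c in range(cols):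
--             buckets[r + c] += row[c]
--     buckets.reverse()
--     return buckets
-- ===== Notes on version B (the rewrite author's own statement) =====
-- stated objective: alternative
-- what changed: Instead of walking each diagonal from a moving start position, B makes a single row-major pass over the matrix, scattering every cell into a bucket indexed by its anti-diagonal sum r+c, and reverses the bucket list at the end.
import Mathlib
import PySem

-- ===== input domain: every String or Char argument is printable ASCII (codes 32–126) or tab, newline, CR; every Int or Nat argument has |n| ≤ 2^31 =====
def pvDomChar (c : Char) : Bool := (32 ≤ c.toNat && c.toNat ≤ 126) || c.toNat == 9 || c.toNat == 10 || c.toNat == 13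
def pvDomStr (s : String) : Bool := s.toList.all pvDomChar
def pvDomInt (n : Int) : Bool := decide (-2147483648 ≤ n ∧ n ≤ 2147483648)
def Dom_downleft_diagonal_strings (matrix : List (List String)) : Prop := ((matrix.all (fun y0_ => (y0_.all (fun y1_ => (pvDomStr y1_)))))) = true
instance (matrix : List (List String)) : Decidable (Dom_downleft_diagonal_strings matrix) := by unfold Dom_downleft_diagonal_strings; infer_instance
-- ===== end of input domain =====

-- B replaces A's per-diagonal boundary walk by one row-major pass that scatters
-- each cell into a bucket indexed by its anti-diagonal sum r+c, then reverses
-- the bucket list; objective: alternative (same asymptotic cost).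

-- ===== PORT A =====
-- inner while loop: while row < rows and col >= 0: diag += matrix[row][col]; row += 1; col -= 1
def dlInner (matrix : List (List String)) (rows : Int) (row col : Int) (acc : String) : String :=
  if _h : row < rows ∧ 0 ≤ col then
    dlInner matrix rows (row + 1) (col - 1)
      (acc ++ PySem.List.pyGetD (PySem.List.pyGetD matrix row []) col "")
  else acc
termination_by (rows - row).toNat
decreasing_by omega

-- outer while loop on (starting_row, starting_col, diagonals); the fuel argument only
-- makes the recursion structural: it is never exhausted on A's actual initial state.
def dlOuter (fuel : Nat) (matrix : List (List String)) (rows cols : Int)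
    (startingRow startingCol : Int) (diagonals : List String) : List String :=
  match fuel with
  | 0 => diagonals
  | fuel + 1 =>
    if 0 ≤ startingCol then
      dlOuter fuel matrix rows cols
        (if (((diagonals ++ [dlInner matrix rows startingRow startingCol ""]).length : Int) < rows)
          then startingRow - 1 else 0)
        (if (((diagonals ++ [dlInner matrix rows startingRow startingCol ""]).length : Int) < rows)
          then cols - 1 else startingCol - 1)
        (diagonals ++ [dlInner matrix rows startingRow startingCol ""])
    else diagonals

def downleft_diagonal_strings (matrix : List (List String)) : List String :=
  let rows : Int := matrix.length
  let cols : Int := ((PySem.List.pyGetD matrix 0 []).length : Int)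
  dlOuter (rows + cols).toNat matrix rows cols (rows - 1) (cols - 1) []

-- ===== PORT B =====
-- inner loop 'for c in range(cols): buckets[r+c] += row[c]' (pySetD/pyGetD are exact
-- here: every written index r+c is nonnegative and in range on the rectangular
-- matrices Pre_ admits)
def bRowFill (cols : Int) (p : Int × List String) (bk : List String) : List String :=
  (PySem.List.pyRange 0 cols 1).foldl
    (fun bk c => PySem.List.pySetD bk (p.1 + c)
      ((PySem.List.pyGetD bk (p.1 + c) "") ++ PySem.List.pyGetD p.2 c "")) bk

def downleft_diagonal_strings_alt (matrix : List (List String)) : List String :=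
  let rows : Int := matrix.length
  let cols : Int := ((PySem.List.pyGetD matrix 0 []).length : Int)
  if cols = 0 then []
  else
    ((PySem.List.enumerate matrix 0).foldl (fun bk p => bRowFill cols p bk)
      (List.replicate (rows + cols - 1).toNat "")).reverse

-- ===== PRECONDITION & SPEC =====
-- Pre_ excludes exactly the inputs where Python A raises IndexError: the empty matrix
-- (matrix[0]) and ragged matrices with a row shorter than the first row (every cell of
-- every row up to column cols-1 is read by some diagonal).
def Pre_downleft_diagonal_strings (matrix : List (List String)) : Prop :=
  matrix ≠ [] ∧ ∀ row ∈ matrix, matrix.headI.length ≤ row.length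
instance (matrix : List (List String)) : Decidable (Pre_downleft_diagonal_strings matrix) := by
  unfold Pre_downleft_diagonal_strings; infer_instance

def pvWitness_downleft_diagonal_strings : List (List String) := [["a", "b"], ["c", "d"]]

def Spec_downleft_diagonal_strings (matrix : List (List String)) (out : List String) : Prop :=
  out = downleft_diagonal_strings_alt matrix
instance (matrix : List (List String)) (out : List String) :
    Decidable (Spec_downleft_diagonal_strings matrix out) := by
  unfold Spec_downleft_diagonal_strings; infer_instance

-- ===== CLAIM (what is proved, stated in full; the proofs are below) =====
def Claim_equal_downleft_diagonal_strings : Prop :=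
  ∀ (matrix : List (List String)), Dom_downleft_diagonal_strings matrix →
    Pre_downleft_diagonal_strings matrix →
    Spec_downleft_diagonal_strings matrix (downleft_diagonal_strings matrix)

-- ===== LEMMAS AND PROOFS =====

-- the diagonal with anti-diagonal sum s, as a join (both ports are proved equal to
-- the map of this function over the descending range of s)
def diagAt (matrix : List (List String)) (rows cols : Int) (s : Int) : String :=
  PySem.Str.join "" ((PySem.List.pyRange (max 0 (s - cols + 1)) (min rows (s + 1)) 1).map
    (fun r => PySem.List.pyGetD (PySem.List.pyGetD matrix r []) (s - r) ""))

lemma str_join_empty_cons (x : String) (l : List String) :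
    PySem.Str.join "" (x :: l) = x ++ PySem.Str.join "" l := by
  apply String.toList_inj.mp
  simp [PySem.Str.join]
  cases l with
  | nil => simp
  | cons y t => simp [PySem.Chars.join_cons_cons]

lemma str_join_empty_nil : PySem.Str.join "" ([] : List String) = "" := by decide

lemma str_join_empty_append_singleton (l : List String) (x : String) :
    PySem.Str.join "" (l ++ [x]) = PySem.Str.join "" l ++ x := by
  induction l with
  | nil => simp [str_join_empty_cons, str_join_empty_nil]
  | cons y t ih => simp [str_join_empty_cons, ih, String.append_assoc]

-- A's inner loop builds exactly the join of the pieces on the anti-diagonal s = row+col,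
-- for r from row up to min rows (row+col+1).
lemma dlInner_eq (matrix : List (List String)) (rows : Int) :
    ∀ (m : Nat) (row col : Int) (acc : String), (rows - row).toNat ≤ m →
      dlInner matrix rows row col acc =
        acc ++ PySem.Str.join "" ((PySem.List.pyRange row (min rows (row + col + 1)) 1).map
          (fun r => PySem.List.pyGetD (PySem.List.pyGetD matrix r []) (row + col - r) "")) := by
  intro m
  induction m with
  | zero =>
    intro row col acc hm
    rw [dlInner, dif_neg (by omega), PySem.List.pyRange_one_eq_nil (by omega)]
    simp [str_join_empty_nil]
  | succ m ih =>
    intro row col acc hm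
    rw [dlInner]
    by_cases h : row < rows ∧ 0 ≤ col
    · rw [dif_pos h, ih (row + 1) (col - 1) _ (by omega)]
      have hlt : row < min rows (row + col + 1) := by omega
      rw [PySem.List.pyRange_one_cons hlt, List.map_cons, str_join_empty_cons]
      have harg : row + 1 + (col - 1) = row + col := by ring
      rw [harg]
      simp [String.append_assoc]
    · rw [dif_neg h, PySem.List.pyRange_one_eq_nil (by omega)]
      simp [str_join_empty_nil]

-- One run of A's outer loop from the reachable state with n diagonals still to build:
-- starting_row = max 0 (n - cols), starting_col = (n-1) - starting_row, and it appends
-- the diagonals for s = n-1 down to 0.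
lemma dlOuter_run (matrix : List (List String)) (rows cols : Int) (hc : 0 < cols) :
    ∀ (n fuel : Nat) (L : List String) (sr sc : Int), n ≤ fuel →
      (L.length : Int) + n = rows + cols - 1 →
      sr = max 0 ((n : Int) - cols) → sc = (n : Int) - 1 - sr →
      dlOuter fuel matrix rows cols sr sc L
        = L ++ (PySem.List.pyRange ((n : Int) - 1) (-1) (-1)).map (diagAt matrix rows cols) := by
  intro n
  induction n with
  | zero =>
    intro fuel L sr sc _ _ hsr hsc
    rw [PySem.List.pyRange_neg_one_eq_nil (by norm_num)]
    cases fuel with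
    | zero => simp [dlOuter]
    | succ f => rw [dlOuter, if_neg (by push_cast at hsr hsc; omega)]; simp
  | succ n ih =>
    intro fuel L sr sc hfuel hlen hsr hsc
    obtain ⟨f, rfl⟩ : ∃ f, fuel = f + 1 := ⟨fuel - 1, by omega⟩
    push_cast at hlen hsr hsc
    rw [dlOuter, if_pos (show (0:Int) ≤ sc by omega)]
    have hd : dlInner matrix rows sr sc "" = diagAt matrix rows cols (n : Int) := by
      rw [dlInner_eq matrix rows (rows - sr).toNat sr sc "" (le_refl _)]
      unfold diagAt
      rw [show sr + sc + 1 = (n : Int) + 1 by omega]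
      rw [show max 0 ((n : Int) - cols + 1) = sr by omega]
      have h3 : ∀ r : Int, sr + sc - r = (n : Int) - r := by intro r; omega
      simp only [h3]
      simp
    rw [hd]
    have hlen' : (((L ++ [diagAt matrix rows cols (n : Int)]).length : Int)) = rows + cols - 1 - n := by
      simp; omega
    by_cases hph : ((L ++ [diagAt matrix rows cols (n : Int)]).length : Int) < rows
    · -- phase 1: cols ≤ n, the start column stays cols-1 and the start row moves up
      rw [if_pos hph, if_pos hph,
        ih f _ (sr - 1) (cols - 1) (by omega) (by simp; omega) (by omega) (by omega)]
      rw [show ((n + 1 : Nat) : Int) - 1 = (n : Int) by push_cast; ring,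
        PySem.List.pyRange_neg_one_cons (show (-1:Int) < (n : Int) by omega)]
      simp
    · -- phase 2: n < cols, the start row stays 0 and the start column moves left
      rw [if_neg hph, if_neg hph,
        ih f _ 0 (sc - 1) (by omega) (by simp; omega) (by omega) (by omega)]
      rw [show ((n + 1 : Nat) : Int) - 1 = (n : Int) by push_cast; ring,
        PySem.List.pyRange_neg_one_cons (show (-1:Int) < (n : Int) by omega)]
      simp

-- B's inner loop preserves the bucket-list length
lemma bRowFill_length (cols : Int) (p : Int × List String) (bk : List String) :
    (bRowFill cols p bk).length = bk.length := by
  unfold bRowFill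
  generalize PySem.List.pyRange 0 cols 1 = l
  induction l generalizing bk with
  | nil => rfl
  | cons c t ih => simp [List.foldl_cons, ih, PySem.List.length_pySetD]

-- pointwise effect of B's inner loop: bucket s gets row[s-r] appended iff r ≤ s < r+cols
lemma bRowFill_getD (r : Int) (row : List String) (hr : 0 ≤ r) :
    ∀ (m : Nat) (bk : List String), r + m ≤ (bk.length : Int) → ∀ (s : Nat),
      (bRowFill (m : Int) (r, row) bk).getD s "" =
        if r ≤ (s : Int) ∧ (s : Int) < r + m then
          bk.getD s "" ++ PySem.List.pyGetD row ((s : Int) - r) ""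
        else bk.getD s "" := by
  intro m
  induction m with
  | zero =>
    intro bk _ s
    rw [if_neg (by omega)]
    unfold bRowFill
    rw [PySem.List.pyRange_one_eq_nil (by norm_num)]
    rfl
  | succ m ih =>
    intro bk hlen s
    have hsplit : PySem.List.pyRange 0 ((m : Nat) + 1 : Int) 1
        = PySem.List.pyRange 0 (m : Int) 1 ++ [(m : Int)] :=
      PySem.List.pyRange_one_succ_right (by positivity)
    unfold bRowFill
    rw [show (((m + 1 : Nat) : Int)) = ((m : Nat) + 1 : Int) by push_cast; ring, hsplit,
      List.foldl_append]
    have hprev : (PySem.List.pyRange 0 (m : Int) 1).foldl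
        (fun bk c => PySem.List.pySetD bk ((r, row).1 + c)
          ((PySem.List.pyGetD bk ((r, row).1 + c) "") ++ PySem.List.pyGetD (r, row).2 c "")) bk
        = bRowFill (m : Int) (r, row) bk := rfl
    rw [hprev]
    have hplen : ((bRowFill (m : Int) (r, row) bk).length : Int) = (bk.length : Int) := by
      rw [bRowFill_length]
    simp only [List.foldl_cons, List.foldl_nil]
    rw [show r + ((m : Nat) : Int) = (((r + (m : Nat)).toNat : Nat) : Int) by omega,
      PySem.List.pySetD_natCast, PySem.List.pyGetD_natCast]
    have hidx : ((r + (m : Int)).toNat) < (bRowFill (m : Int) (r, row) bk).length := by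
      rw [bRowFill_length]; omega
    by_cases hs : (s : Int) = r + (m : Int)
    · have hsn : s = (r + (m : Int)).toNat := by omega
      rw [hsn, List.getD_eq_getElem _ _ (by simpa using hidx), List.getElem_set_self,
        List.getD_eq_getElem _ _ hidx]
      rw [show (bRowFill (m : Int) (r, row) bk)[(r + (m : Int)).toNat] =
          (bRowFill (m : Int) (r, row) bk).getD ((r + (m : Int)).toNat) "" by
        rw [List.getD_eq_getElem _ _ hidx]]
      rw [ih bk (by omega) _]
      rw [if_neg (by omega), if_pos (by constructor <;> omega),
        show ((((r + (m : Int)).toNat : Nat) : Int) - r) = (m : Int) by omega]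
    · have hne : (r + (m : Int)).toNat ≠ s := by omega
      rw [List.getD, List.getElem?_set_ne hne, ← List.getD]
      rw [ih bk (by omega) s]
      by_cases hc1 : r ≤ (s : Int) ∧ (s : Int) < r + m
      · rw [if_pos hc1, if_pos (by omega)]
      · rw [if_neg hc1, if_neg (by omega)]

-- total-cols form of the previous lemma
lemma bRowFill_getD' (r : Int) (row : List String) (hr : 0 ≤ r) (cols : Int) (hc : 0 ≤ cols)
    (bk : List String) (hlen : r + cols ≤ (bk.length : Int)) (s : Nat) :
    (bRowFill cols (r, row) bk).getD s "" =
      if r ≤ (s : Int) ∧ (s : Int) < r + cols then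
        bk.getD s "" ++ PySem.List.pyGetD row ((s : Int) - r) ""
      else bk.getD s "" := by
  rw [show cols = ((cols.toNat : Nat) : Int) by omega]
  exact bRowFill_getD r row hr cols.toNat bk (by omega) s

-- the bucket list after the first k rows have been scattered
def bkState (matrix : List (List String)) (cols : Int) (N k : Nat) : List String :=
  (List.range N).map (fun (s : Nat) =>
    PySem.Str.join "" ((PySem.List.pyRange (max 0 ((s : Int) - cols + 1))
        (min (k : Int) ((s : Int) + 1)) 1).map
      (fun r => PySem.List.pyGetD (PySem.List.pyGetD matrix r []) ((s : Int) - r) "")))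

lemma bkState_length (matrix : List (List String)) (cols : Int) (N k : Nat) :
    (bkState matrix cols N k).length = N := by simp [bkState]

-- scattering row k advances the state from k to k+1
lemma bRowFill_state (matrix : List (List String)) (cols : Int) (N k : Nat) (row : List String)
    (hrow : matrix[k]? = some row) (hN : (k : Int) + cols ≤ (N : Int)) (hc : 0 < cols) :
    bRowFill cols ((k : Int), row) (bkState matrix cols N k) = bkState matrix cols N (k + 1) := by
  have hcols : cols = ((cols.toNat : Nat) : Int) := by omega
  apply List.ext_getElem
  · rw [bRowFill_length, bkState_length, bkState_length]
  · intro s h1 h2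
    rw [bkState_length] at h2
    have hget : ∀ (L : List String) (hs : s < L.length), L[s] = L.getD s "" := by
      intro L hs; rw [List.getD_eq_getElem]
    rw [hget, hget _ (by rw [bkState_length]; exact h2)]
    rw [bRowFill_getD' (k : Int) row (by positivity) cols (by omega)
      (bkState matrix cols N k) (by rw [bkState_length]; omega) s]
    have hbk : ∀ (j : Nat), s < N → (bkState matrix cols N j).getD s "" =
        PySem.Str.join "" ((PySem.List.pyRange (max 0 ((s : Int) - cols + 1))
          (min (j : Int) ((s : Int) + 1)) 1).map
          (fun r => PySem.List.pyGetD (PySem.List.pyGetD matrix r []) ((s : Int) - r) "")) := by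
      intro j hsN
      unfold bkState
      rw [List.getD_eq_getElem _ _ (by simpa using hsN), List.getElem_map, List.getElem_range]
    rw [hbk _ h2, hbk _ h2]
    by_cases hcond : (k : Int) ≤ (s : Int) ∧ (s : Int) < (k : Int) + cols
    · rw [if_pos hcond]
      have hext : PySem.List.pyRange (max 0 ((s : Int) - cols + 1))
            (min (((k : Nat) + 1 : Nat) : Int) ((s : Int) + 1)) 1
          = PySem.List.pyRange (max 0 ((s : Int) - cols + 1))
            (min ((k : Nat) : Int) ((s : Int) + 1)) 1 ++ [(k : Int)] := by
        rw [show (min (((k : Nat) + 1 : Nat) : Int) ((s : Int) + 1)) = (k : Int) + 1 by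
          push_cast at hcond ⊢; omega]
        rw [show (min ((k : Nat) : Int) ((s : Int) + 1)) = (k : Int) by omega]
        rw [PySem.List.pyRange_one_succ_right (by omega)]
      rw [hext, List.map_append, List.map_singleton, str_join_empty_append_singleton]
      congr 1
      rw [show PySem.List.pyGetD matrix ((k : Nat) : Int) [] = row by
        rw [PySem.List.pyGetD_natCast, List.getD, hrow]; rfl]
    · rw [if_neg hcond]
      congr 2
      by_cases hlt : (s : Int) < (k : Int)
      · rw [show (min ((k : Nat) : Int) ((s : Int) + 1)) = (s : Int) + 1 by omega,
          show (min (((k : Nat) + 1 : Nat) : Int) ((s : Int) + 1)) = (s : Int) + 1 by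
            push_cast; omega]
      · have hge : (k : Int) + cols ≤ (s : Int) := by omega
        rw [PySem.List.pyRange_one_eq_nil (by omega),
          PySem.List.pyRange_one_eq_nil (by push_cast at hge ⊢; omega)]

-- folding B's outer loop over the remaining rows advances the state to the end
lemma fold_rows (matrix : List (List String)) (cols : Int) (N : Nat)
    (hN : (N : Int) = (matrix.length : Int) + cols - 1) (hc : 0 < cols) :
    ∀ (l : List (List String)) (k : Nat), matrix.drop k = l →
      (PySem.List.enumerate l (k : Int)).foldl (fun bk p => bRowFill cols p bk)
          (bkState matrix cols N k)
        = bkState matrix cols N (k + l.length) := by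
  intro l
  induction l with
  | nil => intro k _; simp [PySem.List.enumerate_nil]
  | cons row t ih =>
    intro k hdrop
    have hk : k < matrix.length := by
      by_contra h
      rw [List.drop_eq_nil_of_le (by omega)] at hdrop
      exact List.cons_ne_nil _ _ hdrop.symm
    have hrow : matrix[k]? = some row := by
      have h : (matrix.drop k)[0]? = some row := by rw [hdrop]; rfl
      rw [List.getElem?_drop] at h
      simpa using h
    rw [PySem.List.enumerate_cons, List.foldl_cons,
      bRowFill_state matrix cols N k row hrow (by omega) hc]
    have hstep : matrix.drop (k + 1) = t := by
      have h := congrArg (List.drop 1) hdrop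
      rw [List.drop_drop] at h
      simpa [Nat.add_comm] using h
    have := ih (k + 1) hstep
    rw [show ((k : Int) + 1) = (((k + 1 : Nat) : Nat) : Int) by push_cast; ring, this]
    congr 1
    simp
    omega

-- the initial bucket list is the state after 0 rows
lemma bkState_zero (matrix : List (List String)) (cols : Int) (N : Nat) :
    bkState matrix cols N 0 = List.replicate N "" := by
  unfold bkState
  rw [List.eq_replicate_iff]
  constructor
  · simp
  · intro b hb
    simp only [List.mem_map] at hb
    obtain ⟨s, _, rfl⟩ := hb
    rw [PySem.List.pyRange_one_eq_nil (by omega)]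
    exact str_join_empty_nil

-- the final bucket state is the ascending list of diagonals
lemma bkState_final (matrix : List (List String)) (rows cols : Int) (N : Nat)
    (hrows : rows = (matrix.length : Int)) :
    bkState matrix cols N matrix.length
      = (List.range N).map (fun (s : Nat) => diagAt matrix rows cols (s : Int)) := by
  unfold bkState diagAt
  rw [hrows]

-- descending int range = reverse of the nat range, mapped
lemma pyRange_desc_eq_reverse (N : Nat) :
    PySem.List.pyRange ((N : Int) - 1) (-1) (-1)
      = ((List.range N).map (fun (k : Nat) => (k : Int))).reverse := by
  induction N with
  | zero => rw [PySem.List.pyRange_neg_one_eq_nil (by norm_num)]; simp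
  | succ n ih =>
    rw [show ((((n : Nat) + 1 : Nat) : Int) - 1) = (n : Int) by push_cast; ring]
    by_cases hn : n = 0
    · subst hn; decide
    · rw [PySem.List.pyRange_neg_one_cons (by omega),
        show ((n : Int) - 1) = (((n : Nat) : Int)) - 1 by rfl, ih,
        List.range_succ]
      simp

-- ===== VERDICT (by name: the statement is the Claim_ definition above) =====
theorem downleft_diagonal_strings_spec : Claim_equal_downleft_diagonal_strings := by
  unfold Claim_equal_downleft_diagonal_strings
  intro matrix _ hpre
  unfold Spec_downleft_diagonal_strings downleft_diagonal_strings downleft_diagonal_strings_alt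
  obtain ⟨hne, _⟩ := hpre
  have hrows : 1 ≤ (matrix.length : Int) := by
    cases matrix with
    | nil => exact absurd rfl hne
    | cons x xs => simp
  set rows : Int := (matrix.length : Int) with hrowsdef
  set cols : Int := ((PySem.List.pyGetD matrix 0 []).length : Int) with hcols
  have hc0 : 0 ≤ cols := by simp [hcols]
  by_cases hc : cols = 0
  · -- no columns: the outer loop never runs and B returns [] directly
    rw [if_pos hc]
    show dlOuter (rows + cols).toNat matrix rows cols (rows - 1) (cols - 1) [] = []
    obtain ⟨f, hf⟩ : ∃ f, (rows + cols).toNat = f + 1 := ⟨(rows + cols).toNat - 1, by omega⟩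
    rw [hf, dlOuter, if_neg (by omega)]
  · rw [if_neg hc]
    have hcpos : 0 < cols := by omega
    set N : Nat := (rows + cols - 1).toNat with hNdef
    have hNcast : (N : Int) = rows + cols - 1 := by omega
    show dlOuter (rows + cols).toNat matrix rows cols (rows - 1) (cols - 1) []
      = ((PySem.List.enumerate matrix 0).foldl (fun bk p => bRowFill cols p bk)
          (List.replicate N "")).reverse
    -- A's side
    rw [dlOuter_run matrix rows cols hcpos N (rows + cols).toNat []
      (rows - 1) (cols - 1) (by omega) (by simp; omega) (by omega) (by omega)]
    -- B's side
    rw [← bkState_zero matrix cols N,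
      show (0 : Int) = ((0 : Nat) : Int) by rfl,
      fold_rows matrix cols N (by omega) hcpos matrix 0 (by simp),
      Nat.zero_add,
      bkState_final matrix rows cols N hrowsdef,
      pyRange_desc_eq_reverse N]
    simp
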